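-- pv_equiv track=rewrite | github.com/sadewadee/email-enhancer | contact_extractor.py | _dedupe_suspicious_variants
-- ===== SOURCE A (Python) =====
-- from typing import Set, List, Dict, Tuple, Optional
--
-- def _dedupe_suspicious_variants(emails: List[Dict]) -> List[Dict]:
--     """Remove suspicious variant emails when a cleaner variant exists.
--
--     Example: keep 'hypmalta@gmail.com' and drop
--     'maltaemailhypmalta@gmail.com' when 'hypmalta' is a substring of the
--     longer local-part and the longer contains the token 'email'.
--     """
--     if not emails:
--         return []
--
--     # Group by domain
--     by_domain: Dict[str, List[Dict]] = {}
--     for e in emails: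
--         norm = e.get('value_normalized', '')
--         parts = norm.split('@', 1)
--         if len(parts) != 2:
--             continue
--         local, domain = parts[0], parts[1]
--         by_domain.setdefault(domain, []).append(e)
--
--     result: List[Dict] = []
--     for domain, group in by_domain.items():
--         if len(group) == 1:
--             result.extend(group)
--             continue
--
--         # Build locals list and track indices to keep
--         locals = [g['value_normalized'].split('@', 1)[0] for g in group]
--         keep = set(range(len(group)))
--
--         # If a longer local contains a shorter local and includes 'email', drop longer
--         for i, li in enumerate(locals):
--             for j, lj in enumerate(locals):
--                 if i == j:
--                     continue
--                 if len(lj) > len(li) and li and li in lj and ('email' in lj):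
--                     if j in keep:
--                         keep.remove(j)
--
--         for idx in range(len(group)):
--             if idx in keep:
--                 result.append(group[idx])
--
--     return result
-- ===== SOURCE B (Python) =====
-- from typing import List, Dict
--
--
-- def _has_shorter_local_inside(pool, s):
--     """True iff some proper, non-empty contiguous substring of s is a local
--     in pool (a hash set).  Enumerates s's own substrings instead of scanning
--     the other group members."""
--     n = len(s)
--     for length in range(1, n):
--         for i in range(n - length + 1):
--             if s[i:i+length] in pool:
--                 return True
--     return False
--
--
-- def _dedupe_suspicious_variants(emails: List[Dict]) -> List[Dict]:
--     """Inverted check: per domain, put all local-parts in a hash set once,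
--     then decide each email by enumerating the proper substrings of its own
--     local-part against that set -- no pairwise member-vs-member scan."""
--     groups = {}
--     for e in emails:
--         parts = e.get('value_normalized', '').split('@', 1)
--         if len(parts) == 2:
--             groups.setdefault(parts[1], []).append((parts[0], e))
--
--     out = []
--     for pairs in groups.values():
--         pool = {local for local, _ in pairs}
--         for local, e in pairs:
--             if 'email' in local and _has_shorter_local_inside(pool, local):
--                 continue
--             out.append(e)
--     return out
-- ===== Notes on version B (the rewrite author's own statement) =====
-- stated objective: alternative
-- what changed: B replaces A's pairwise member-vs-member substring scan per domain with an inverted check: all local-parts of a domain go into a hash set once and each email is decided by enumerating the proper substrings of its own local-part against that set.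
import Mathlib
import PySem

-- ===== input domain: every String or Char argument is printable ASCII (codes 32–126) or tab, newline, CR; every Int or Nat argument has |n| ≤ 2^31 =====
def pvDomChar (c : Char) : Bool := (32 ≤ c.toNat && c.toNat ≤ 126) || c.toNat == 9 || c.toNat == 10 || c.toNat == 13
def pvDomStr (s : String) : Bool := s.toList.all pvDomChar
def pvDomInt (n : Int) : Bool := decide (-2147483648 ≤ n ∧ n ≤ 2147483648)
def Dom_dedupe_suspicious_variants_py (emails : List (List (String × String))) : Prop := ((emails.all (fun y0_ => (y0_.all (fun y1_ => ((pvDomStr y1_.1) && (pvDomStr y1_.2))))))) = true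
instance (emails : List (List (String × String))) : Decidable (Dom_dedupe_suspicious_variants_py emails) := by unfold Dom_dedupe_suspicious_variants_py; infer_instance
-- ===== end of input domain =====

-- B inverts A's per-domain pairwise member-vs-member substring scan: all locals of a domain go into
-- a hash set once and each email is decided by enumerating the proper substrings of its own local
-- against that set; objective: alternative (a different data structure, no speed claim).

-- ===== PORT A =====
-- e.get('value_normalized', '').split('@', 1): sep '@' ≠ '' so splitMax? is always some; .getD [] totalizes
def pvA_parts (e : List (String × String)) : List String :=
  (PySem.Str.splitMax? (PySem.Dict.getD (PySem.Dict.mk e) "value_normalized" "") "@" 1).getD []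

-- g['value_normalized'].split('@', 1)[0]: the KeyError default "" and headD "" are unreachable for
-- group members (each group member's value contains '@'), kept only to totalize
def pvA_local (g : List (String × String)) : String :=
  ((PySem.Str.splitMax? (((PySem.Dict.mk g).get? "value_normalized").getD "") "@" 1).getD []).headD ""

-- the condition of A's inner loop: len(lj) > len(li) and li and li in lj and ('email' in lj)
def pvA_cond (li lj : String) : Bool :=
  decide (PySem.Str.len li < PySem.Str.len lj) && !(li == "") &&
  PySem.Str.isIn li lj && PySem.Str.isIn "email" lj

-- A's inner 'for j, lj in enumerate(locals)' pass for a fixed (i, li); 'if j in keep: keep.remove(j)'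
def pvA_inner (i : Int × String) (locs : List (Int × String)) (keep : PySem.Set Int) : PySem.Set Int :=
  locs.foldl (fun keep2 j =>
    if i.1 = j.1 then keep2
    else if pvA_cond i.2 j.2 then
      (if PySem.Set.contains keep2 j.1 then PySem.Set.discard keep2 j.1 else keep2)
    else keep2) keep

def dedupe_suspicious_variants_py (emails : List (List (String × String))) : List (List (String × String)) :=
  if emails = [] then []
  else
    let by_domain : PySem.Dict String (List (List (String × String))) :=
      emails.foldl (fun d e =>
        match pvA_parts e with
        | [_loc, domain] => PySem.Dict.modify d domain [] (fun grp => grp ++ [e])  -- setdefault(domain, []).append(e)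
        | _ => d) PySem.Dict.empty
    by_domain.items.foldl (fun result kv =>
      if kv.2.length = 1 then result ++ kv.2
      else
        let locs := PySem.List.enumerate (kv.2.map pvA_local)
        let keep :=
          locs.foldl (fun k i => pvA_inner i locs k)
            (PySem.Set.ofList (PySem.List.pyRange 0 (kv.2.length : Int) 1))
        (PySem.List.pyRange 0 (kv.2.length : Int) 1).foldl (fun res idx =>
          if PySem.Set.contains keep idx then res ++ [PySem.List.pyGetD kv.2 idx []] else res)
          result) []

-- ===== PORT B =====
-- _has_shorter_local_inside(pool, s): the two 'for' loops with early 'return True' are the nested 'any'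
def pvB_hasShorter (pool : PySem.Set String) (s : String) : Bool :=
  (PySem.List.pyRange 1 (PySem.Str.len s) 1).any (fun n =>
    (PySem.List.pyRange 0 (PySem.Str.len s - n + 1) 1).any (fun i =>
      PySem.Set.contains pool (PySem.Str.slice s (some i) (some (i + n)))))

def dedupe_suspicious_variants_py_alt (emails : List (List (String × String))) : List (List (String × String)) :=
  let groups : PySem.Dict String (List (String × List (String × String))) :=
    emails.foldl (fun g e =>
      let parts := (PySem.Str.splitMax? (PySem.Dict.getD (PySem.Dict.mk e) "value_normalized" "") "@" 1).getD []
      if parts.length = 2 then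
        -- setdefault(parts[1], []).append((parts[0], e)); both indices are in range, getD totalizes
        PySem.Dict.modify g (parts.getD 1 "") [] (fun ps => ps ++ [(parts.getD 0 "", e)])
      else g) PySem.Dict.empty
  groups.values.foldl (fun out pairs =>
    let pool : PySem.Set String := PySem.Set.ofList (pairs.map (fun p => p.1))  -- {local for local, _ in pairs}
    pairs.foldl (fun out2 le =>
      if PySem.Str.isIn "email" le.1 && pvB_hasShorter pool le.1
      then out2 else out2 ++ [le.2]) out) []

-- ===== PRECONDITION & SPEC =====
def Spec_dedupe_suspicious_variants_py (emails : List (List (String × String))) (out : List (List (String × String))) : Prop := out = dedupe_suspicious_variants_py_alt emails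
instance (emails : List (List (String × String))) (out : List (List (String × String))) : Decidable (Spec_dedupe_suspicious_variants_py emails out) := by unfold Spec_dedupe_suspicious_variants_py; infer_instance

-- ===== CLAIM (what is proved, stated in full; the proofs are below) =====
def Claim_equal_dedupe_suspicious_variants_py : Prop := ∀ (emails : List (List (String × String))), Dom_dedupe_suspicious_variants_py emails → Spec_dedupe_suspicious_variants_py emails (dedupe_suspicious_variants_py emails)

-- ===== LEMMAS AND PROOFS =====

def pvLoc (e : List (String × String)) : String := (pvA_parts e).headD ""

def pvKey? (e : List (String × String)) : Option (String × List (String × String)) :=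
  match pvA_parts e with
  | [_loc, domain] => some (domain, e)
  | _ => none

def pvPair (e : List (String × String)) : String × List (String × String) := (pvLoc e, e)

-- B's drop condition, named
def pvDropB (pairs : List (String × List (String × String))) (le : String × List (String × String)) : Bool :=
  PySem.Str.isIn "email" le.1 && pvB_hasShorter (PySem.Set.ofList (pairs.map (fun p => p.1))) le.1

-- the keys and groups both ports build, per domain
def pvKeysOf (emails : List (List (String × String))) : List String :=
  PySem.Set.ofList ((emails.filterMap pvKey?).map (fun p => p.1))

def pvGroupOf (emails : List (List (String × String))) (k : String) : List (List (String × String)) :=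
  ((emails.filterMap pvKey?).filter (fun p => p.1 == k)).map (fun p => p.2)

-- the common normal form both programs are proved equal to
def pvCommon (emails : List (List (String × String))) : List (List (String × String)) :=
  (pvKeysOf emails).flatMap (fun k =>
    (((pvGroupOf emails k).map pvPair).filter
      (fun le => !pvDropB ((pvGroupOf emails k).map pvPair) le)).map (fun le => le.2))

lemma pvA_local_eq_pvLoc (g : List (String × String)) : pvA_local g = pvLoc g := rfl

-- Bool condition unpacked to its four conjuncts
lemma pvA_cond_iff (li lj : String) : pvA_cond li lj = true ↔
    (PySem.Str.len li < PySem.Str.len lj ∧ li ≠ "" ∧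
     PySem.Str.isIn li lj = true ∧ PySem.Str.isIn "email" lj = true) := by
  unfold pvA_cond
  simp [and_assoc]

-- A's grouping fold as a fold over filterMap pvKey?
lemma pvA_fold_eq (emails : List (List (String × String)))
    (d : PySem.Dict String (List (List (String × String)))) :
    emails.foldl (fun d e =>
        match pvA_parts e with
        | [_loc, domain] => PySem.Dict.modify d domain [] (fun grp => grp ++ [e])
        | _ => d) d
    = (emails.filterMap pvKey?).foldl (fun d p => PySem.Dict.modify d p.1 [] (fun grp => grp ++ [p.2])) d := by
  induction emails generalizing d with
  | nil => rfl
  | cons e t ih =>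
    simp only [List.foldl_cons, List.filterMap_cons]
    rcases he : pvA_parts e with _ | ⟨l, _ | ⟨dm, _ | _⟩⟩ <;>
      simp only [pvKey?, he, List.foldl_cons] <;> exact ih _

-- B's grouping fold, in terms of the same filterMap
lemma pvB_fold_eq (emails : List (List (String × String)))
    (d : PySem.Dict String (List (String × List (String × String)))) :
    emails.foldl (fun g e =>
      let parts := (PySem.Str.splitMax? (PySem.Dict.getD (PySem.Dict.mk e) "value_normalized" "") "@" 1).getD []
      if parts.length = 2 then
        PySem.Dict.modify g (parts.getD 1 "") [] (fun ps => ps ++ [(parts.getD 0 "", e)])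
      else g) d
    = ((emails.filterMap pvKey?).map (fun p => (p.1, pvPair p.2))).foldl
        (fun d p => PySem.Dict.modify d p.1 [] (fun ps => ps ++ [p.2])) d := by
  induction emails generalizing d with
  | nil => rfl
  | cons e t ih =>
    have hb : (PySem.Str.splitMax? (PySem.Dict.getD (PySem.Dict.mk e) "value_normalized" "") "@" 1).getD []
        = pvA_parts e := rfl
    simp only [List.foldl_cons, List.filterMap_cons, hb]
    rcases he : pvA_parts e with _ | ⟨l, _ | ⟨dm, _ | _⟩⟩ <;>
      simp only [pvKey?, he, List.map_cons, List.foldl_cons, List.length_cons, List.length_nil,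
        List.getD, List.getElem?_cons_zero, List.getElem?_cons_succ, List.getElem?_nil,
        Option.getD_some, Option.getD_none, if_true] <;>
      first
        | exact ih _
        | · have hp : pvPair e = (l, e) := by simp [pvPair, pvLoc, he]
            rw [hp]; exact ih _

-- discard removes exactly one value
lemma pv_contains_discard (s : PySem.Set Int) (y x : Int) :
    PySem.Set.contains (PySem.Set.discard s y) x = (PySem.Set.contains s x && !(x == y)) := by
  simp [PySem.Set.contains, PySem.Set.discard, List.contains_eq_mem, List.mem_filter]
  by_cases h : x = y <;> simp [h]

-- one step of A's inner loop
lemma pv_contains_step (i j : Int × String) (s : PySem.Set Int) (x : Int) :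
    PySem.Set.contains
      (if i.1 = j.1 then s
       else if pvA_cond i.2 j.2 then
         (if PySem.Set.contains s j.1 then PySem.Set.discard s j.1 else s)
       else s) x
    = (PySem.Set.contains s x && !((!(i.1 == j.1)) && pvA_cond i.2 j.2 && (j.1 == x))) := by
  split_ifs with h1 h2 h3
  · simp [h1]
  · rw [pv_contains_discard]
    by_cases hx : x = j.1
    · simp [hx, h1, h2]
    · have e1 : (x == j.1) = false := beq_eq_false_iff_ne.mpr hx
      have e2 : (j.1 == x) = false := beq_eq_false_iff_ne.mpr (fun h => hx h.symm)
      simp [e1, e2]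
  · by_cases hx : x = j.1
    · have hc : PySem.Set.contains s j.1 = false := Bool.eq_false_iff.mpr h3
      simp only [PySem.Set.contains, List.contains_eq_mem, decide_eq_false_iff_not] at hc
      simp [hx, hc]
    · have e2 : (j.1 == x) = false := beq_eq_false_iff_ne.mpr (fun h => hx h.symm)
      simp [e2]
  · simp [h2]

-- characterization of A's inner pass
lemma pv_contains_inner (i : Int × String) (L : List (Int × String)) (s : PySem.Set Int) (x : Int) :
    PySem.Set.contains (pvA_inner i L s) x
      = (PySem.Set.contains s x &&
         !(L.any (fun j => (!(i.1 == j.1)) && pvA_cond i.2 j.2 && (j.1 == x)))) := by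
  induction L generalizing s with
  | nil => simp [pvA_inner]
  | cons j t ih =>
    simp only [pvA_inner, List.foldl_cons, List.any_cons] at *
    rw [ih, pv_contains_step]
    rw [Bool.not_or, Bool.and_assoc]

-- characterization of A's double loop
lemma pv_contains_outer (O L : List (Int × String)) (s : PySem.Set Int) (x : Int) :
    PySem.Set.contains (O.foldl (fun k i => pvA_inner i L k) s) x
      = (PySem.Set.contains s x &&
         !(O.any (fun i => L.any (fun j => (!(i.1 == j.1)) && pvA_cond i.2 j.2 && (j.1 == x))))) := by
  induction O generalizing s with
  | nil => simp
  | cons i t ih =>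
    simp only [List.foldl_cons, List.any_cons, ih, pv_contains_inner]
    rw [Bool.not_or, Bool.and_assoc]

-- the removal condition at a concrete index k
lemma pv_rem_iff (locals : List String) (k : Nat) (hk : k < locals.length) :
    ((PySem.List.enumerate locals).any (fun i => (PySem.List.enumerate locals).any
        (fun j => (!(i.1 == j.1)) && pvA_cond i.2 j.2 && (j.1 == (k : Int)))))
      = locals.any (fun l => pvA_cond l locals[k]) := by
  rw [Bool.eq_iff_iff]
  simp only [List.any_eq_true, PySem.List.mem_enumerate_iff, Bool.and_eq_true, Bool.not_eq_true',
    beq_eq_false_iff_ne, beq_iff_eq]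
  constructor
  · rintro ⟨i, ⟨m, hm, rfl⟩, j, ⟨n, hn, rfl⟩, ⟨hne, hc⟩, hjk⟩
    simp only [zero_add] at *
    have : n = k := by exact_mod_cast hjk
    subst this
    exact ⟨locals[m], List.getElem_mem hm, hc⟩
  · rintro ⟨l, hl, hc⟩
    obtain ⟨m, hm, rfl⟩ := List.getElem_of_mem hl
    refine ⟨(0 + (m : Int), locals[m]), ⟨m, hm, rfl⟩, (0 + (k : Int), locals[k]), ⟨k, hk, rfl⟩,
      ⟨?_, hc⟩, by simp⟩
    -- m ≠ k since pvA_cond forces a strictly shorter first argument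
    intro he
    have hmk : m = k := by
      have : (m : Int) = (k : Int) := by simpa using he
      exact_mod_cast this
    subst hmk
    exact absurd ((pvA_cond_iff _ _).mp hc).1 (lt_irrefl _)

-- B's substring-set test, characterized: some proper non-empty substring of L is in P
lemma pv_hasShorter_iff (P : List String) (L : String) :
    pvB_hasShorter (PySem.Set.ofList P) L = true ↔
      ∃ l ∈ P, l ≠ "" ∧ PySem.Str.len l < PySem.Str.len L ∧ PySem.Str.isIn l L = true := by
  unfold pvB_hasShorter
  simp only [List.any_eq_true, PySem.List.mem_pyRange_one, PySem.Set.contains,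
    List.contains_eq_mem, decide_eq_true_eq]
  constructor
  · rintro ⟨n, ⟨h1n, hnL⟩, i, ⟨h0i, hiB⟩, hmem⟩
    have hmemP := (PySem.Set.mem_ofList _ _).mp hmem
    have hlenL : PySem.Str.len L = (L.toList.length : Int) := PySem.Str.len_eq L
    have hn0 : (0 : Int) ≤ n := by omega
    lift n to ℕ using hn0 with m
    lift i to ℕ using h0i with j
    have htl : (PySem.Str.slice L (some (j : Int)) (some ((j : Int) + (m : Int)))).toList
        = (L.toList.drop j).take m := by
      rw [PySem.Str.toList_slice, PySem.Chars.slice_eq_listSlice, PySem.List.slice_natCast_add]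
    have hbound : j + m ≤ L.toList.length := by omega
    have hlen : (PySem.Str.slice L (some (j : Int)) (some ((j : Int) + (m : Int)))).toList.length = m := by
      rw [htl, List.length_take, List.length_drop]; omega
    refine ⟨_, hmemP, ?_, ?_, ?_⟩
    · intro h0
      rw [h0] at hlen
      simp at hlen
      omega
    · rw [PySem.Str.len_eq, hlen]; omega
    · rw [PySem.Str.isIn_iff_infix, htl]
      exact ((List.take_prefix m (L.toList.drop j)).isInfix).trans
        ((List.drop_suffix j L.toList).isInfix)
  · rintro ⟨l, hl, hne, hlt, hin⟩
    obtain ⟨u, v, huv⟩ := (PySem.Str.isIn_iff_infix l L).mp hin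
    have hlenL : PySem.Str.len L = (L.toList.length : Int) := PySem.Str.len_eq L
    have hlenl : PySem.Str.len l = (l.toList.length : Int) := PySem.Str.len_eq l
    have hlpos : 0 < l.toList.length := by
      cases hc : l.toList with
      | nil => exact absurd (String.toList_eq_nil_iff.mp hc) hne
      | cons a t => simp
    have hlensum : u.length + (l.toList.length + v.length) = L.toList.length := by
      rw [← huv]; simp
    refine ⟨(l.toList.length : Int), ⟨by exact_mod_cast hlpos, by omega⟩,
      (u.length : Int), ⟨by positivity, by omega⟩, ?_⟩
    have hslice : (PySem.Str.slice L (some (u.length : Int))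
        (some ((u.length : Int) + (l.toList.length : Int)))).toList = l.toList := by
      rw [PySem.Str.toList_slice, PySem.Chars.slice_eq_listSlice, PySem.List.slice_natCast_add,
        ← huv, List.append_assoc, List.drop_left, List.take_left]
    have hs : PySem.Str.slice L (some (u.length : Int))
        (some ((u.length : Int) + (l.toList.length : Int))) = l := String.toList_inj.mp hslice
    rw [hs]
    exact (PySem.Set.mem_ofList _ _).mpr hl

-- A's drop condition equals B's drop condition, through pvPair
lemma pv_cond_eq (grp : List (List (String × String))) (e : List (String × String)) :
    (grp.map pvLoc).any (fun l => pvA_cond l (pvLoc e))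
      = pvDropB (grp.map pvPair) (pvPair e) := by
  rw [Bool.eq_iff_iff]
  unfold pvDropB
  have hfst : (grp.map pvPair).map (fun p => p.1) = grp.map pvLoc := by
    rw [List.map_map]; rfl
  rw [hfst, Bool.and_eq_true, pv_hasShorter_iff]
  simp only [List.any_eq_true, pvA_cond_iff]
  constructor
  · rintro ⟨l, hl, hlt, hne, hin, hem⟩
    exact ⟨hem, l, hl, hne, hlt, hin⟩
  · rintro ⟨hem, l, hl, hne, hlt, hin⟩
    exact ⟨l, hl, hlt, hne, hin, hem⟩

-- a singleton group never drops its own element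
lemma pv_not_dropB_self (pairs : List (String × List (String × String)))
    (le : String × List (String × String)) (h : pairs = [le]) : pvDropB pairs le = false := by
  subst h
  unfold pvDropB
  have hfalse : pvB_hasShorter (PySem.Set.ofList ([le].map (fun p => p.1))) le.1 = false := by
    rw [Bool.eq_false_iff]
    intro htrue
    obtain ⟨l, hl, -, hlt, -⟩ := (pv_hasShorter_iff _ _).mp htrue
    simp only [List.map_cons, List.map_nil, List.mem_cons, List.not_mem_nil, or_false] at hl
    subst hl; exact absurd hlt (lt_irrefl _)
  rw [hfalse, Bool.and_false]

-- B's per-group fold, generalized over the iterated list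
lemma pv_b_fold_gen (pairs l : List (String × List (String × String))) (out : List (List (String × String))) :
    l.foldl (fun out2 le =>
      if PySem.Str.isIn "email" le.1 && pvB_hasShorter (PySem.Set.ofList (pairs.map (fun p => p.1))) le.1
      then out2 else out2 ++ [le.2]) out
    = out ++ (l.filter (fun le => !pvDropB pairs le)).map (fun le => le.2) := by
  induction l generalizing out with
  | nil => simp
  | cons x t ih =>
    rw [List.foldl_cons, List.filter_cons]
    have hg : (PySem.Str.isIn "email" x.1 && pvB_hasShorter (PySem.Set.ofList (pairs.map (fun p => p.1))) x.1)
        = pvDropB pairs x := rfl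
    rw [hg]
    cases hc : pvDropB pairs x
    · rw [ih]; simp
    · rw [ih]; simp

-- per-group: A's body equals the filtered form
lemma pv_group_eq (grp : List (List (String × String))) (result : List (List (String × String))) :
    (if grp.length = 1 then result ++ grp
     else
       (PySem.List.pyRange 0 (grp.length : Int) 1).foldl (fun res idx =>
         if PySem.Set.contains
              ((PySem.List.enumerate (grp.map pvA_local)).foldl
                (fun k i => pvA_inner i (PySem.List.enumerate (grp.map pvA_local)) k)
                (PySem.Set.ofList (PySem.List.pyRange 0 (grp.length : Int) 1))) idx
         then res ++ [PySem.List.pyGetD grp idx []] else res) result)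
    = result ++ ((grp.map pvPair).filter (fun le => !pvDropB (grp.map pvPair) le)).map (fun le => le.2) := by
  have hq : ((grp.map pvPair).filter (fun le => !pvDropB (grp.map pvPair) le)).map (fun le => le.2)
      = grp.filter (fun e => !pvDropB (grp.map pvPair) (pvPair e)) := by
    rw [List.filter_map, List.map_map]
    have h1 : (fun le => !pvDropB (grp.map pvPair) le) ∘ pvPair
        = fun e => !pvDropB (grp.map pvPair) (pvPair e) := rfl
    rw [h1]
    have h2 : (fun (le : String × List (String × String)) => le.2) ∘ pvPair = id := rfl
    rw [h2, List.map_id]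
  by_cases hlen : grp.length = 1
  · obtain ⟨e, rfl⟩ := List.length_eq_one_iff.mp hlen
    rw [if_pos hlen, hq]
    have hfe : List.filter (fun e' => !pvDropB ([e].map pvPair) (pvPair e')) [e] = [e] := by
      simp only [List.filter_cons, List.filter_nil]
      have hnd : pvDropB [pvPair e] (pvPair e) = false := pv_not_dropB_self _ _ rfl
      simp [hnd]
    rw [hfe]
  · rw [if_neg hlen, PySem.List.foldl_append_if, hq]
    congr 1
    set q' : List (String × String) → Bool :=
      fun e => !pvDropB (grp.map pvPair) (pvPair e) with hq'def
    have hpt : ∀ idx ∈ PySem.List.pyRange 0 (grp.length : Int) 1,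
        PySem.Set.contains
          ((PySem.List.enumerate (grp.map pvA_local)).foldl
            (fun k i => pvA_inner i (PySem.List.enumerate (grp.map pvA_local)) k)
            (PySem.Set.ofList (PySem.List.pyRange 0 (grp.length : Int) 1))) idx
        = q' (PySem.List.pyGetD grp idx []) := by
      intro idx hidx
      obtain ⟨h0, hlt⟩ := PySem.List.mem_pyRange_one.mp hidx
      have hik : idx = ((idx.toNat : Nat) : Int) := (Int.toNat_of_nonneg h0).symm
      have hkn : idx.toNat < grp.length := by omega
      rw [pv_contains_outer]
      have hc0 : PySem.Set.contains
          (PySem.Set.ofList (PySem.List.pyRange 0 (grp.length : Int) 1)) idx = true := by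
        simp only [PySem.Set.contains, List.contains_eq_mem, decide_eq_true_eq]
        exact (PySem.Set.mem_ofList _ _).mpr (PySem.List.mem_pyRange_one.mpr ⟨h0, hlt⟩)
      rw [hc0, Bool.true_and]
      have hmapA : grp.map pvA_local = grp.map pvLoc := by
        simp [pvA_local_eq_pvLoc]
      rw [hmapA, hik]
      have hk' : idx.toNat < (grp.map pvLoc).length := by simpa using hkn
      rw [pv_rem_iff (grp.map pvLoc) idx.toNat hk']
      have hget : (grp.map pvLoc)[idx.toNat] = pvLoc grp[idx.toNat] := by simp
      rw [hget, pv_cond_eq grp grp[idx.toNat]]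
      have hgd : PySem.List.pyGetD grp ((idx.toNat : Nat) : Int) [] = grp[idx.toNat] := by
        rw [PySem.List.pyGetD_eq_getElem grp [] (by omega) (by exact_mod_cast hkn)]
        simp only [Int.toNat_natCast]
      rw [hgd, hq'def]
    rw [List.filter_congr hpt]
    have hsnd : grp.filter q' = ((PySem.List.enumerate grp).map (fun p => p.2)).filter q' := by
      rw [PySem.List.map_snd_enumerate]
    rw [hsnd, List.filter_map,
        PySem.List.enumerate_eq_map_pyRange grp [], List.filter_map, List.map_map]
    simp only [PySem.List.len_eq]
    rfl

-- ===== assemble: A equals the common form =====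
lemma pvA_eq_common (emails : List (List (String × String))) :
    dedupe_suspicious_variants_py emails = pvCommon emails := by
  by_cases h : emails = []
  · subst h; rfl
  · simp only [dedupe_suspicious_variants_py, if_neg h]
    rw [pvA_fold_eq emails PySem.Dict.empty]
    have hnodup : ((emails.filterMap pvKey?).foldl
        (fun d p => PySem.Dict.modify d p.1 [] (fun grp => grp ++ [p.2])) PySem.Dict.empty).keys.Nodup := by
      exact PySem.Dict.nodup_keys_foldl_modify_key _ _ _ _ _ (by simp [PySem.Dict.empty])
    rw [PySem.Dict.items_eq_map_keys _ hnodup []]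
    rw [PySem.Dict.keys_foldl_modify_key]
    have hge : ∀ c : String,
        (PySem.Dict.empty : PySem.Dict String (List (List (String × String)))).getD c [] = [] :=
      fun _ => rfl
    simp only [PySem.Dict.getD_foldl_modify_append, hge, List.nil_append]
    rw [List.foldl_map]
    simp only [pv_group_eq]
    rw [PySem.List.foldl_append_eq_flatMap]
    simp only [List.nil_append]
    rfl

-- ===== assemble: B equals the common form =====
lemma pvB_eq_common (emails : List (List (String × String))) :
    dedupe_suspicious_variants_py_alt emails = pvCommon emails := by
  simp only [dedupe_suspicious_variants_py_alt]
  rw [pvB_fold_eq emails PySem.Dict.empty]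
  have hnodup : (((emails.filterMap pvKey?).map (fun p => (p.1, pvPair p.2))).foldl
      (fun d p => PySem.Dict.modify d p.1 [] (fun ps => ps ++ [p.2])) PySem.Dict.empty).keys.Nodup := by
    exact PySem.Dict.nodup_keys_foldl_modify_key _ _ _ _ _ (by simp [PySem.Dict.empty])
  rw [PySem.Dict.values_eq_map_keys _ hnodup []]
  rw [PySem.Dict.keys_foldl_modify_key]
  have hge : ∀ c : String,
      (PySem.Dict.empty : PySem.Dict String (List (String × List (String × String)))).getD c [] = [] :=
    fun _ => rfl
  simp only [PySem.Dict.getD_foldl_modify_append, hge, List.nil_append]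
  rw [List.foldl_map]
  simp only [pv_b_fold_gen]
  rw [PySem.List.foldl_append_eq_flatMap]
  simp only [List.nil_append]
  -- identify the per-key group lists
  have hmapfst : ((emails.filterMap pvKey?).map (fun p => (p.1, pvPair p.2))).map (fun p => p.1)
      = (emails.filterMap pvKey?).map (fun p => p.1) := by
    rw [List.map_map]; rfl
  have hgrp : ∀ k : String,
      (((emails.filterMap pvKey?).map (fun p => (p.1, pvPair p.2))).filter (fun p => p.1 == k)).map (fun p => p.2)
      = (pvGroupOf emails k).map pvPair := by
    intro k
    rw [List.filter_map, List.map_map, pvGroupOf, List.map_map]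
    rfl
  rw [pvCommon, pvKeysOf, ← hmapfst]
  congr 1
  funext k
  rw [hgrp k]

-- ===== VERDICT (by name: the statement is the Claim_ definition above) =====
theorem dedupe_suspicious_variants_py_spec : Claim_equal_dedupe_suspicious_variants_py := by
  intro emails _
  unfold Spec_dedupe_suspicious_variants_py
  rw [pvA_eq_common, pvB_eq_common]
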